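-- pv_equiv track=rewrite | github.com/kkongchii/codingtest | 프로그래머스/lv2/42626. 더 맵게/더 맵게.py | solution
-- ===== SOURCE A (Python) =====
-- import heapq
--
-- def solution(scoville, K):
--     count = 0
--     # scoville.sort()
--     # while scoville[0]<K:
--     #     if len(scoville) < 2:
--     #         return -1
--     #     new = scoville.pop(0) + (scoville.pop(0)*2)
--     #     scoville.append(new)
--     #     scoville.sort()
--     #     count += 1
--     # 정확성 테스트 모두 통과
--     # 효율성테스트 걸림 -> list 크기가 백만이라 매 loop마다 sort하는게 빡센가보다
--     # 왜 heap인가 했더니 힙은 원소 pop, push마다 자동으로 정렬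
--     # 파이썬에서 따로 힙이 있나 구글링 결과 heapq 발견
--     heapq.heapify(scoville)
--     while scoville[0]<K:
--         if len(scoville) < 2:
--             return -1
--         new = heapq.heappop(scoville) + (heapq.heappop(scoville)*2)
--         heapq.heappush(scoville, new)
--         count += 1
--
--     answer = count
--     return answer
-- ===== SOURCE B (Python) =====
-- def _insert(lst, v):
--     # insert v into the sorted list lst, keeping it sorted (after equal elements)
--     for i, x in enumerate(lst):
--         if v < x:
--             lst.insert(i, v)
--             return
--     lst.append(v)
--
--
-- def solution(scoville, K):
--     # sorted working list instead of a heap (A mutates scoville in place; B does not)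
--     lst = sorted(scoville)
--     count = 0
--     while lst[0] < K:
--         if len(lst) < 2:
--             return -1
--         new = lst[0] + lst[1] * 2
--         lst = lst[2:]
--         _insert(lst, new)
--         count += 1
--     return count
-- ===== Notes on version B (the rewrite author's own statement) =====
-- stated objective: alternative
-- what changed: Replaces the binary heap (heapify/heappop/heappush) by a once-sorted plain list with ordered re-insertion of each combined value; B also does not mutate the caller's list.
import Mathlib
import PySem

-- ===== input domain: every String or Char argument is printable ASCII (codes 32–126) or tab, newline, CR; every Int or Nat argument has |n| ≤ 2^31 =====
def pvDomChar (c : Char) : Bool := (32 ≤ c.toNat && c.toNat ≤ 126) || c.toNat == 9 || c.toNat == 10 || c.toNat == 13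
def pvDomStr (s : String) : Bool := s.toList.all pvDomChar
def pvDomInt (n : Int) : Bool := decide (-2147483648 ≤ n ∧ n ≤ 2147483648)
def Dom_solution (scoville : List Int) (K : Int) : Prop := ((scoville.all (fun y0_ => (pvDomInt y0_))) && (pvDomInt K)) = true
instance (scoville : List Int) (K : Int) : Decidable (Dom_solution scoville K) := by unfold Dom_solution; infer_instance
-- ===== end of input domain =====

-- B replaces A's binary heap by a once-sorted list with ordered re-insertion; equivalence is about
-- the RETURN value only (A reorders the caller's list in place, B leaves it untouched).

-- ===== PORT A =====
-- A calls heapq; PySem has no heapq, so CPython's heapq (heapify/heappop/heappush with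
-- _siftdown/_siftup) is ported by hand below, step for step. All list indexing performed by
-- these routines is in range, where `pvGet` (getD 0) is exact. Each while-loop is realized as
-- structural recursion on a fuel argument that provably dominates its iteration count: the
-- fuel is a pure totality device, on every admitted input the loop's own guard stops it first.
def pvGet (h : List Int) (i : Nat) : Int := h.getD i 0

-- heapq._siftdown(heap, startpos, pos) with newitem = the value conceptually at `pos`
-- (Python pre-writes heap[pos] = newitem; every exit path below writes `item` at the current
-- position and the loop never reads index `pos` first, so the result is identical; Python's
-- local `parent` = pvGet h ((pos-1)/2) is inlined). pos strictly decreases, so fuel = pos.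
def sdlGo : Nat → List Int → Nat → Nat → Int → List Int
  | 0, h, _, pos, item => h.set pos item      -- fuel 0 forces pos = 0: the guard start < pos is false
  | fuel+1, h, start, pos, item =>
    if start < pos then
      if item < pvGet h ((pos - 1) / 2) then
        sdlGo fuel (h.set pos (pvGet h ((pos - 1) / 2))) start ((pos - 1) / 2) item
      else h.set pos item
    else h.set pos item

def siftdownLoop (h : List Int) (start pos : Nat) (item : Int) : List Int :=
  sdlGo pos h start pos item

-- the while-loop of heapq._siftup: move the smaller child up until a leaf, returning the
-- array and the final (leaf) position of the hole. h.length - pos strictly decreases.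
def sulGo : Nat → List Int → Nat → List Int × Nat
  | 0, h, pos => (h, pos)                     -- fuel 0 forces h.length ≤ pos: the guard is false
  | fuel+1, h, pos =>
    if 2*pos+1 < h.length then
      if 2*pos+2 < h.length ∧ ¬ (pvGet h (2*pos+1) < pvGet h (2*pos+2)) then
        sulGo fuel (h.set pos (pvGet h (2*pos+2))) (2*pos+2)
      else
        sulGo fuel (h.set pos (pvGet h (2*pos+1))) (2*pos+1)
    else (h, pos)

def siftupLoop (h : List Int) (pos : Nat) : List Int × Nat := sulGo (h.length - pos) h pos

-- heapq._siftup(heap, pos)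
def siftup (h : List Int) (pos : Nat) : List Int :=
  let item := pvGet h pos
  let r := siftupLoop h pos
  siftdownLoop r.1 pos r.2 item

-- heapq.heapify: for i in reversed(range(n//2)): _siftup(x, i)
def heapify (l : List Int) : List Int :=
  (List.range (l.length / 2)).reverse.foldl (fun h i => siftup h i) l

-- heapq.heappush: append, then _siftdown(heap, 0, len-1)
def heappush (h : List Int) (item : Int) : List Int :=
  siftdownLoop (h ++ [item]) 0 h.length item

-- heapq.heappop (raises IndexError on []; every call site in `solution` is guarded, see Pre_)
def heappop (h : List Int) : Int × List Int :=
  -- last = h[-1] popped off, rest = remaining list (Python's locals, inlined)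
  if h.dropLast.isEmpty then (pvGet h (h.length - 1), h.dropLast)
  else (pvGet h.dropLast 0, siftup (h.dropLast.set 0 (pvGet h (h.length - 1))) 0)

-- the while-loop of solution; each pass shortens the heap by one, so fuel = h.length
-- (fuel 0 means h = [], where Python's scoville[0] raises: outside Pre_)
def solGo : Nat → List Int → Int → Int → Int
  | 0, _, _, count => count
  | fuel+1, h, K, count =>
    if pvGet h 0 < K then
      if h.length < 2 then -1
      else
        solGo fuel (heappush (heappop (heappop h).2).2 ((heappop h).1 + (heappop (heappop h).2).1 * 2)) K (count + 1)
    else count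

def solutionLoop (h : List Int) (K : Int) (count : Int) : Int := solGo h.length h K count

def solution (scoville : List Int) (K : Int) : Int :=
  solutionLoop (heapify scoville) K 0

-- ===== PORT B =====
-- Source B's _insert: scan the sorted list, insert before the first strictly larger element
def insertSorted (v : Int) : List Int → List Int
  | [] => [v]
  | x :: rest => if v < x then v :: x :: rest else x :: insertSorted v rest

-- the while-loop of Source B's solution; each pass shortens the list by one, so fuel = s.length
-- (fuel 0 means s = [], where Source B's lst[0] raises: outside Pre_)
def altGo : Nat → List Int → Int → Int → Int
  | 0, _, _, count => count
  | fuel+1, s, K, count =>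
    if s.headD 0 < K then
      if s.length < 2 then -1
      else altGo fuel (insertSorted (s.headD 0 + (s.drop 1).headD 0 * 2) (s.drop 2)) K (count + 1)
    else count

def altLoop (s : List Int) (K : Int) (count : Int) : Int := altGo s.length s K count

def solution_alt (scoville : List Int) (K : Int) : Int :=
  altLoop (PySem.List.sorted scoville (fun x => x) false) K 0

-- ===== PRECONDITION & SPEC =====
-- Pre_ excludes only the empty list, on which A's `scoville[0]` raises IndexError.
def Pre_solution (scoville : List Int) (K : Int) : Prop := scoville ≠ []
instance (scoville : List Int) (K : Int) : Decidable (Pre_solution scoville K) := by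
  unfold Pre_solution; infer_instance

def pvWitness_solution : List Int × Int := ([1, 2, 3, 9, 10, 12], 7)

def Spec_solution (scoville : List Int) (K : Int) (out : Int) : Prop := out = solution_alt scoville K
instance (scoville : List Int) (K : Int) (out : Int) : Decidable (Spec_solution scoville K out) := by
  unfold Spec_solution; infer_instance

-- ===== CLAIM (what is proved, stated in full; the proofs are below) =====
def Claim_equal_solution : Prop := ∀ (scoville : List Int) (K : Int), Dom_solution scoville K → Pre_solution scoville K → Spec_solution scoville K (solution scoville K)

-- ===== LEMMAS AND PROOFS =====

-- parent index in the implicit binary heap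
def par (j : Nat) : Nat := (j - 1) / 2

-- `anc s j`: j lies in the subtree rooted at s (iterating `par` from j reaches s)
def anc (s j : Nat) : Prop :=
  if j = 0 then s = 0
  else s = j ∨ (s < j ∧ anc s (par j))
termination_by j
decreasing_by simp only [par]; omega

-- min-heap property of the whole array
def heapInv (h : List Int) : Prop :=
  ∀ j, 0 < j → j < h.length → pvGet h (par j) ≤ pvGet h j

theorem par_lt (j : Nat) (hj : 0 < j) : par j < j :=
  Nat.lt_of_le_of_lt (Nat.div_le_self _ _) (by omega)

theorem anc_refl (s : Nat) : anc s s := by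
  rw [anc]; split
  · assumption
  · left; rfl

theorem anc_elim (s j : Nat) (h : anc s j) : s = j ∨ (s < j ∧ anc s (par j)) := by
  rw [anc] at h
  split at h
  · left; omega
  · exact h

theorem par_child (s j : Nat) (hj : 0 < j) : par j = s ↔ (j = 2*s+1 ∨ j = 2*s+2) := by
  unfold par; omega

theorem anc_step (s j : Nat) (h1 : s < j) (h2 : anc s (par j)) : anc s j := by
  rw [anc, if_neg (by omega)]; right; exact ⟨h1, h2⟩

theorem anc_le (s j : Nat) (h : anc s j) : s ≤ j := by
  rcases anc_elim s j h with h | h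
  · omega
  · omega

theorem anc_zero (j : Nat) : anc 0 j := by
  induction j using Nat.strong_induction_on with
  | _ j ih =>
    rcases Nat.eq_zero_or_pos j with h | h
    · subst h; exact anc_refl 0
    · exact anc_step 0 j h (ih (par j) (par_lt j h))

theorem anc_trans (s t j : Nat) (h1 : anc s t) (h2 : anc t j) : anc s j := by
  induction j using Nat.strong_induction_on with
  | _ j ih =>
    rcases anc_elim t j h2 with h | ⟨hlt, hp⟩
    · subst h; exact h1
    · exact anc_step s j (Nat.lt_of_le_of_lt (anc_le s t h1) hlt) (ih (par j) (par_lt j (by omega)) hp)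

theorem anc_split (s j : Nat) (h : anc s j) (hne : s ≠ j) :
    anc (2*s+1) j ∨ anc (2*s+2) j := by
  induction j using Nat.strong_induction_on with
  | _ j ih =>
    rcases anc_elim s j h with h' | ⟨hlt, hp⟩
    · omega
    · by_cases hps : par j = s
      · rcases (par_child s j (by omega)).mp hps with h2 | h2
        · left; rw [h2]; exact anc_refl _
        · right; rw [h2]; exact anc_refl _
      · rcases ih (par j) (par_lt j (by omega)) hp (fun he => hps he.symm) with h2 | h2
        · left
          exact anc_step _ j (by have h3 := anc_le (2*s+1) (par j) h2; have h4 := par_lt j (by omega); omega) h2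
        · right
          exact anc_step _ j (by have h3 := anc_le (2*s+2) (par j) h2; have h4 := par_lt j (by omega); omega) h2

theorem anc_laminar (i j e : Nat) (h1 : anc i e) (h2 : anc j e) : anc i j ∨ anc j i := by
  induction e using Nat.strong_induction_on with
  | _ e ih =>
    rcases anc_elim i e h1 with h | ⟨hlt1, hp1⟩
    · subst h; right; exact h2
    · rcases anc_elim j e h2 with h | ⟨hlt2, hp2⟩
      · subst h; left; exact h1
      · exact ih (par e) (par_lt e (by omega)) hp1 hp2

-- pvGet bookkeeping
theorem pvGet_set_self (h : List Int) (i : Nat) (v : Int) (hi : i < h.length) :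
    pvGet (h.set i v) i = v := by
  simp [pvGet, List.getD_eq_getElem?_getD, hi]

theorem pvGet_set_ne (h : List Int) (i j : Nat) (v : Int) (hij : i ≠ j) :
    pvGet (h.set i v) j = pvGet h j := by
  simp [pvGet, List.getD_eq_getElem?_getD, List.getElem?_set_ne hij]

theorem pvGet_append_lt (h t : List Int) (j : Nat) (hj : j < h.length) :
    pvGet (h ++ t) j = pvGet h j := by
  simp [pvGet, List.getD_eq_getElem?_getD, List.getElem?_append_left hj]

theorem set_pvGet_self (h : List Int) (i : Nat) (hi : i < h.length) :
    h.set i (pvGet h i) = h := by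
  have : pvGet h i = h[i] := by simp [pvGet, List.getD_eq_getElem?_getD, List.getElem?_eq_getElem hi]
  rw [this, List.set_getElem_self]

theorem pvGet_mem (h : List Int) (i : Nat) (hi : i < h.length) : pvGet h i ∈ h := by
  have : pvGet h i = h[i] := by simp [pvGet, List.getD_eq_getElem?_getD, List.getElem?_eq_getElem hi]
  rw [this]; exact List.getElem_mem hi

-- permutation bookkeeping for in-place writes
theorem perm_set_eraseIdx (t : List Int) (m : Nat) (y : Int) (hm : m < t.length) :
    (t.set m y).Perm (y :: t.eraseIdx m) := by
  induction t generalizing m with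
  | nil => simp at hm
  | cons b t' ih =>
    cases m with
    | zero => simp
    | succ k =>
      simp only [List.set_cons_succ, List.eraseIdx_cons_succ]
      exact ((ih k (by simpa using hm)).cons b).trans (List.Perm.swap y b _)

theorem perm_self_cons_eraseIdx (t : List Int) (m : Nat) (hm : m < t.length) :
    t.Perm (pvGet t m :: t.eraseIdx m) := by
  have := perm_set_eraseIdx t m (pvGet t m) hm
  rwa [set_pvGet_self t m hm] at this

theorem cons_set_perm (t : List Int) (m : Nat) (v : Int) (hm : m < t.length) :
    (pvGet t m :: t.set m v).Perm (v :: t) := by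
  have h1 := (perm_set_eraseIdx t m v hm).cons (pvGet t m)
  have h2 := (perm_self_cons_eraseIdx t m hm).symm.cons v
  exact (h1.trans (List.Perm.swap v (pvGet t m) _)).trans h2

theorem set_set_perm (h : List Int) (i j : Nat) (v : Int)
    (hi : i < h.length) (hj : j < h.length) (hij : i ≠ j) :
    ((h.set i (pvGet h j)).set j v).Perm (h.set i v) := by
  induction h generalizing i j with
  | nil => simp at hi
  | cons a t ih =>
    match i, j with
    | 0, 0 => omega
    | 0, m+1 =>
      have hm : m < t.length := by simpa using hj
      simpa [pvGet] using cons_set_perm t m v hm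
    | k+1, 0 =>
      have hk : k < t.length := by simpa using hi
      have h1 := (perm_set_eraseIdx t k a hk).cons v
      have h2 := ((perm_set_eraseIdx t k v hk).symm.cons a).symm
      simp only [List.set_cons_succ, List.set_cons_zero, pvGet, List.getD_cons_zero]
      exact ((h1.trans (List.Perm.swap a v _)).trans h2.symm)
    | k+1, m+1 =>
      have := ih k m (by simpa using hi) (by simpa using hj) (by omega)
      simpa [pvGet] using this.cons a

-- one-step unfolding lemmas for the loops
-- length bookkeeping
theorem sdlGo_length (f : Nat) : ∀ (h : List Int) (s p : Nat) (i : Int),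
    (sdlGo f h s p i).length = h.length := by
  induction f with
  | zero => intro h s p i; simp [sdlGo]
  | succ f ih => intro h s p i; rw [sdlGo]; split_ifs <;> simp [ih]

theorem siftdownLoop_length (h : List Int) (s p : Nat) (i : Int) :
    (siftdownLoop h s p i).length = h.length := sdlGo_length p h s p i

theorem sulGo_length (f : Nat) : ∀ (h : List Int) (p : Nat),
    (sulGo f h p).1.length = h.length := by
  induction f with
  | zero => intro h p; simp [sulGo]
  | succ f ih => intro h p; rw [sulGo]; split_ifs <;> simp [ih]

theorem siftupLoop_length (h : List Int) (p : Nat) :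
    (siftupLoop h p).1.length = h.length := sulGo_length _ h p

theorem siftup_length (h : List Int) (p : Nat) : (siftup h p).length = h.length := by
  simp [siftup, siftdownLoop_length, siftupLoop_length]

theorem heappush_length (h : List Int) (x : Int) :
    (heappush h x).length = h.length + 1 := by
  simp [heappush, siftdownLoop_length]

theorem heappop_length (h : List Int) : (heappop h).2.length = h.length - 1 := by
  unfold heappop
  split <;> simp [siftup_length]

theorem insertSorted_length (v : Int) (l : List Int) :
    (insertSorted v l).length = l.length + 1 := by
  induction l with
  | nil => rfl
  | cons x rest ih => simp only [insertSorted]; split <;> simp [ih]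

-- the fuel is irrelevant once it dominates the iteration count
theorem sdlGo_fuel (f : Nat) : ∀ (g : Nat) (h : List Int) (s pos : Nat) (item : Int),
    pos ≤ f → pos ≤ g → sdlGo f h s pos item = sdlGo g h s pos item := by
  induction f with
  | zero =>
    intro g h s pos item hf hg
    have hp : pos = 0 := by omega
    subst hp
    cases g with
    | zero => rfl
    | succ g => rw [sdlGo, sdlGo, if_neg (by omega)]
  | succ f ih =>
    intro g h s pos item hf hg
    cases g with
    | zero =>
      have hp : pos = 0 := by omega
      subst hp
      rw [sdlGo, sdlGo, if_neg (by omega)]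
    | succ g =>
      rw [sdlGo, sdlGo]
      by_cases h1 : s < pos
      · rw [if_pos h1, if_pos h1]
        by_cases h2 : item < pvGet h ((pos - 1) / 2)
        · rw [if_pos h2, if_pos h2]
          have hlt : (pos - 1) / 2 < pos :=
            Nat.lt_of_le_of_lt (Nat.div_le_self _ _) (by omega)
          exact ih g _ s _ item (by omega) (by omega)
        · rw [if_neg h2, if_neg h2]
      · rw [if_neg h1, if_neg h1]

theorem siftdownLoop_rec (h : List Int) (s pos : Nat) (item : Int)
    (h1 : s < pos) (h2 : item < pvGet h (par pos)) :
    siftdownLoop h s pos item = siftdownLoop (h.set pos (pvGet h (par pos))) s (par pos) item := by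
  obtain ⟨k, rfl⟩ : ∃ k, pos = k + 1 := ⟨pos - 1, by omega⟩
  have hpar : par (k+1) = k / 2 := by simp [par]
  have hle : k / 2 ≤ k := Nat.div_le_self k 2
  unfold siftdownLoop
  rw [sdlGo, if_pos h1, if_pos (by rw [hpar] at h2; simpa using h2)]
  rw [hpar]
  simp only [Nat.add_sub_cancel]
  exact sdlGo_fuel k (k / 2) _ s (k / 2) item hle (le_refl _)

theorem siftdownLoop_base (h : List Int) (s pos : Nat) (item : Int)
    (hcond : ¬ s < pos ∨ ¬ item < pvGet h (par pos)) :
    siftdownLoop h s pos item = h.set pos item := by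
  unfold siftdownLoop
  cases pos with
  | zero => rfl
  | succ k =>
    rw [sdlGo]
    by_cases h1 : s < k + 1
    · have h2 : ¬ item < pvGet h (par (k+1)) := by tauto
      have hpar : par (k+1) = k / 2 := by simp [par]
      rw [hpar] at h2
      rw [if_pos h1, if_neg (by simpa using h2)]
    · rw [if_neg h1]

def sulChild (h : List Int) (pos : Nat) : Nat :=
  if 2*pos+2 < h.length ∧ ¬ (pvGet h (2*pos+1) < pvGet h (2*pos+2)) then 2*pos+2 else 2*pos+1

theorem sulGo_fuel (f : Nat) : ∀ (g : Nat) (h : List Int) (pos : Nat),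
    h.length - pos ≤ f → h.length - pos ≤ g → sulGo f h pos = sulGo g h pos := by
  induction f with
  | zero =>
    intro g h pos hf hg
    cases g with
    | zero => rfl
    | succ g => rw [sulGo, sulGo, if_neg (by omega)]
  | succ f ih =>
    intro g h pos hf hg
    cases g with
    | zero => rw [sulGo, sulGo, if_neg (by omega)]
    | succ g =>
      rw [sulGo, sulGo]
      by_cases h1 : 2*pos+1 < h.length
      · rw [if_pos h1, if_pos h1]
        split_ifs
        · exact ih g _ _ (by simp only [List.length_set]; omega) (by simp only [List.length_set]; omega)
        · exact ih g _ _ (by simp only [List.length_set]; omega) (by simp only [List.length_set]; omega)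
      · rw [if_neg h1, if_neg h1]

theorem siftupLoop_rec (h : List Int) (pos : Nat) (h1 : 2*pos+1 < h.length) :
    siftupLoop h pos = siftupLoop (h.set pos (pvGet h (sulChild h pos))) (sulChild h pos) := by
  unfold siftupLoop
  obtain ⟨m, hm⟩ : ∃ m, h.length - pos = m + 1 := ⟨h.length - pos - 1, by omega⟩
  rw [hm, sulGo, if_pos h1]
  unfold sulChild
  split_ifs with hc
  · exact sulGo_fuel m _ _ _ (by simp only [List.length_set]; omega) (by simp only [List.length_set]; omega)
  · exact sulGo_fuel m _ _ _ (by simp only [List.length_set]; omega) (by simp only [List.length_set]; omega)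

theorem siftupLoop_base (h : List Int) (pos : Nat) (h1 : ¬ 2*pos+1 < h.length) :
    siftupLoop h pos = (h, pos) := by
  unfold siftupLoop
  cases hm : h.length - pos with
  | zero => rfl
  | succ m => rw [sulGo, if_neg h1]

theorem sulChild_lt (h : List Int) (pos : Nat) (h1 : 2*pos+1 < h.length) :
    sulChild h pos < h.length ∧ pos < sulChild h pos ∧ par (sulChild h pos) = pos := by
  unfold sulChild
  split
  · refine ⟨by omega, by omega, ?_⟩
    unfold par; omega
  · refine ⟨h1, by omega, ?_⟩
    unfold par; omega

-- the chosen child holds the smaller of the two child values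
theorem sulChild_min (h : List Int) (pos : Nat) (j : Nat) (h1 : 2*pos+1 < h.length)
    (hj0 : 0 < j) (hj : j < h.length) (hpj : par j = pos) : pvGet h (sulChild h pos) ≤ pvGet h j := by
  have hj2 : j = 2*pos+1 ∨ j = 2*pos+2 := (par_child pos j hj0).mp hpj
  unfold sulChild
  by_cases hc : 2*pos+2 < h.length ∧ ¬ (pvGet h (2*pos+1) < pvGet h (2*pos+2))
  · rw [if_pos hc]
    rcases hj2 with rfl | rfl
    · have := hc.2; omega
    · exact le_refl _
  · rw [if_neg hc]
    rcases hj2 with rfl | rfl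
    · exact le_refl _
    · rcases Decidable.not_and_iff_or_not.mp hc with h' | h'
      · omega
      · have := Decidable.not_not.mp h'
        omega

-- ===== core heap lemmas (statements) =====

theorem sdl_spec (pos : Nat) : ∀ (h : List Int) (s : Nat) (item : Int),
    pos < h.length → anc s pos →
    (∀ j, 0 < j → j < h.length → anc s (par j) → j ≠ pos → par j ≠ pos → pvGet h (par j) ≤ pvGet h j) →
    (∀ j, 0 < j → j < h.length → par j = pos → item ≤ pvGet h j) →
    (∀ j, 0 < j → j < h.length → par j = pos → s < pos → pvGet h (par pos) ≤ pvGet h j) →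
    (siftdownLoop h s pos item).Perm (h.set pos item) ∧
    (∀ j, 0 < j → j < h.length → anc s (par j) →
        pvGet (siftdownLoop h s pos item) (par j) ≤ pvGet (siftdownLoop h s pos item) j) ∧
    (∀ j, ¬ anc s j → pvGet (siftdownLoop h s pos item) j = pvGet h j) := by
  induction pos using Nat.strong_induction_on with
  | _ pos ih =>
    intro h s item hpos hanc Ha Hb Hc
    by_cases hsp : s < pos
    · have hpos0 : 0 < pos := by omega
      have hpplt : par pos < pos := par_lt pos hpos0
      have hanc' : anc s (par pos) := by
        rcases anc_elim s pos hanc with h' | h'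
        · omega
        · exact h'.2
      by_cases hip : item < pvGet h (par pos)
      · -- move the parent down into the hole and recurse at the parent position
        rw [siftdownLoop_rec h s pos item hsp hip]
        set pp := par pos with hpp
        set h' := h.set pos (pvGet h pp) with hh'
        have hlen' : h'.length = h.length := by simp [hh']
        have hjne : ∀ j, par j = pos → 0 < j → j ≠ pos := by
          intro j hj hj0 he
          have := par_lt j hj0
          omega
        have Ha' : ∀ j, 0 < j → j < h'.length → anc s (par j) → j ≠ pp → par j ≠ pp →
            pvGet h' (par j) ≤ pvGet h' j := by
          intro j hj0 hjlen hjanc hjne1 hjne2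
          rw [hlen'] at hjlen
          by_cases hj1 : par j = pos
          · have hjnp : j ≠ pos := hjne j hj1 hj0
            rw [hj1, hh', pvGet_set_self h pos _ hpos, pvGet_set_ne h pos j _ hjnp.symm]
            exact Hc j hj0 hjlen hj1 hsp
          · have hjnp : j ≠ pos := by
              intro he; subst he; exact hjne2 hpp.symm
            rw [hh', pvGet_set_ne h pos (par j) _ (fun he => hj1 he.symm),
              pvGet_set_ne h pos j _ (fun he => hjnp he.symm)]
            exact Ha j hj0 hjlen hjanc hjnp hj1
        have Hb' : ∀ j, 0 < j → j < h'.length → par j = pp → item ≤ pvGet h' j := by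
          intro j hj0 hjlen hjpp
          rw [hlen'] at hjlen
          by_cases hjp : j = pos
          · subst hjp
            rw [hh', pvGet_set_self h j _ hpos]
            exact le_of_lt hip
          · rw [hh', pvGet_set_ne h pos j _ (fun he => hjp he.symm)]
            have h5 : pvGet h (par j) ≤ pvGet h j :=
              Ha j hj0 hjlen (by rw [hjpp]; exact hanc') hjp (by rw [hjpp]; omega)
            rw [hjpp] at h5
            omega
        have Hc' : ∀ j, 0 < j → j < h'.length → par j = pp → s < pp →
            pvGet h' (par pp) ≤ pvGet h' j := by
          intro j hj0 hjlen hjpp hspp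
          rw [hlen'] at hjlen
          have hpp0 : 0 < pp := by omega
          have hppplt : par pp < pp := par_lt pp hpp0
          have hanc'' : anc s (par pp) := by
            rcases anc_elim s pp hanc' with h' | h'
            · omega
            · exact h'.2
          have hstep : pvGet h (par pp) ≤ pvGet h pp :=
            Ha pp hpp0 (by omega) hanc'' (by omega) (by omega)
          rw [hh', pvGet_set_ne h pos (par pp) _ (by omega)]
          by_cases hjp : j = pos
          · subst hjp
            rw [pvGet_set_self h j _ hpos]
            exact hstep
          · rw [pvGet_set_ne h pos j _ (fun he => hjp he.symm)]
            have h5 : pvGet h (par j) ≤ pvGet h j :=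
              Ha j hj0 hjlen (by rw [hjpp]; exact hanc') hjp (by rw [hjpp]; omega)
            rw [hjpp] at h5
            omega
        obtain ⟨P1, P2, P3⟩ := ih pp hpplt h' s item (by omega) hanc' Ha' Hb' Hc'
        refine ⟨?_, ?_, ?_⟩
        · exact P1.trans (set_set_perm h pos pp item hpos (by omega) (by omega))
        · intro j hj0 hjlen hjanc
          exact P2 j hj0 (by omega) hjanc
        · intro j hj
          have hjnp : j ≠ pos := by
            intro he; subst he; exact hj hanc
          rw [P3 j hj, hh', pvGet_set_ne h pos j _ (fun he => hjnp he.symm)]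
      · -- the hole's parent is small enough: place the item and stop
        rw [siftdownLoop_base h s pos item (Or.inr hip)]
        refine ⟨List.Perm.refl _, ?_, ?_⟩
        · intro j hj0 hjlen hjanc
          by_cases hj1 : par j = pos
          · have hjnp : j ≠ pos := by
              have := par_lt j hj0; omega
            rw [hj1, pvGet_set_self h pos _ hpos, pvGet_set_ne h pos j _ hjnp.symm]
            exact Hb j hj0 hjlen hj1
          · by_cases hjp : j = pos
            · subst hjp
              rw [pvGet_set_ne h j (par j) _ (fun he => hj1 he.symm), pvGet_set_self h j _ hpos]
              omega
            · rw [pvGet_set_ne h pos (par j) _ (fun he => hj1 he.symm),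
                pvGet_set_ne h pos j _ (fun he => hjp he.symm)]
              exact Ha j hj0 hjlen hjanc hjp hj1
        · intro j hj
          have hjnp : j ≠ pos := fun he => hj (he ▸ hanc)
          rw [pvGet_set_ne h pos j _ (fun he => hjnp he.symm)]
    · -- pos = s: place the item and stop
      have hse : s = pos := by
        have := anc_le s pos hanc; omega
      rw [siftdownLoop_base h s pos item (Or.inl hsp)]
      refine ⟨List.Perm.refl _, ?_, ?_⟩
      · intro j hj0 hjlen hjanc
        by_cases hj1 : par j = pos
        · have hjnp : j ≠ pos := by
            have := par_lt j hj0; omega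
          rw [hj1, pvGet_set_self h pos _ hpos, pvGet_set_ne h pos j _ hjnp.symm]
          exact Hb j hj0 hjlen hj1
        · have hjp : j ≠ pos := by
            intro he; subst he
            have h1 := anc_le s (par j) hjanc
            have h2 := par_lt j hj0
            omega
          rw [pvGet_set_ne h pos (par j) _ (fun he => hj1 he.symm),
            pvGet_set_ne h pos j _ (fun he => hjp he.symm)]
          exact Ha j hj0 hjlen hjanc hjp hj1
      · intro j hj
        have hjnp : j ≠ pos := fun he => hj (he ▸ hanc)
        rw [pvGet_set_ne h pos j _ (fun he => hjnp he.symm)]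

theorem sul_spec (n : Nat) : ∀ (h : List Int) (s pos : Nat),
    h.length - pos = n → pos < h.length → anc s pos →
    (∀ j, 0 < j → j < h.length → anc s (par j) → j ≠ pos → par j ≠ pos → pvGet h (par j) ≤ pvGet h j) →
    (∀ j, 0 < j → j < h.length → par j = pos → s < pos → pvGet h (par pos) ≤ pvGet h j) →
    (siftupLoop h pos).2 < h.length ∧ anc s (siftupLoop h pos).2 ∧
    ¬ (2*(siftupLoop h pos).2+1 < h.length) ∧
    (∀ v, ((siftupLoop h pos).1.set (siftupLoop h pos).2 v).Perm (h.set pos v)) ∧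
    (∀ j, 0 < j → j < h.length → anc s (par j) → j ≠ (siftupLoop h pos).2 → par j ≠ (siftupLoop h pos).2 →
        pvGet (siftupLoop h pos).1 (par j) ≤ pvGet (siftupLoop h pos).1 j) ∧
    (∀ j, ¬ anc s j → pvGet (siftupLoop h pos).1 j = pvGet h j) := by
  induction n using Nat.strong_induction_on with
  | _ n ih =>
    intro h s pos hn hpos hanc Ha Hc
    by_cases hc1 : 2*pos+1 < h.length
    · obtain ⟨hclen, hcpos, hcpar⟩ := sulChild_lt h pos hc1
      set c := sulChild h pos with hcdef
      set h1 := h.set pos (pvGet h c) with hh1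
      have hlen1 : h1.length = h.length := by simp [hh1]
      have hanc1 : anc s c := anc_step s c (by have := anc_le s pos hanc; omega) (by rw [hcpar]; exact hanc)
      have Ha1 : ∀ j, 0 < j → j < h1.length → anc s (par j) → j ≠ c → par j ≠ c →
          pvGet h1 (par j) ≤ pvGet h1 j := by
        intro j hj0 hjlen hjanc hjc hjpc
        rw [hlen1] at hjlen
        by_cases hjp : j = pos
        · subst hjp
          have hsj : s < j := by
            have h2 := anc_le s (par j) hjanc
            have h3 := par_lt j hj0
            omega
          have hpj : par j ≠ j := by have := par_lt j hj0; omega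
          rw [hh1, pvGet_set_ne h j (par j) _ (fun he => hpj he.symm), pvGet_set_self h j _ hpos]
          exact Hc c (by omega) hclen hcpar hsj
        · by_cases hj1 : par j = pos
          · rw [hj1, hh1, pvGet_set_self h pos _ hpos, pvGet_set_ne h pos j _ (fun he => hjp he.symm)]
            exact sulChild_min h pos j hc1 hj0 hjlen hj1
          · rw [hh1, pvGet_set_ne h pos (par j) _ (fun he => hj1 he.symm),
              pvGet_set_ne h pos j _ (fun he => hjp he.symm)]
            exact Ha j hj0 hjlen hjanc hjp hj1
      have Hc1 : ∀ j, 0 < j → j < h1.length → par j = c → s < c →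
          pvGet h1 (par c) ≤ pvGet h1 j := by
        intro j hj0 hjlen hjc _
        rw [hlen1] at hjlen
        have hjpos : j ≠ pos := by
          have := par_lt j hj0; omega
        rw [hcpar, hh1, pvGet_set_self h pos _ hpos, pvGet_set_ne h pos j _ (fun he => hjpos he.symm)]
        have h5 := Ha j hj0 hjlen (by rw [hjc]; exact hanc1) hjpos (by rw [hjc]; omega)
        rw [hjc] at h5
        exact h5
      have hrec := siftupLoop_rec h pos hc1
      obtain ⟨P1, P2, P3, P4, P5, P6⟩ :=
        ih (h1.length - c) (by omega) h1 s c rfl (by omega) hanc1 Ha1 Hc1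
      rw [← hcdef, ← hh1] at hrec
      rw [hrec]
      rw [hlen1] at P1 P3 P5
      refine ⟨P1, P2, P3, ?_, P5, ?_⟩
      · intro v
        exact (P4 v).trans (set_set_perm h pos c v hpos hclen (by omega))
      · intro j hj
        have hjnp : j ≠ pos := fun he => hj (he ▸ hanc)
        rw [P6 j hj, hh1, pvGet_set_ne h pos j _ (fun he => hjnp he.symm)]
    · rw [siftupLoop_base h pos hc1]
      exact ⟨hpos, hanc, hc1, fun v => List.Perm.refl _, Ha, fun j _ => rfl⟩

theorem siftup_spec (h : List Int) (pos : Nat) (hpos : pos < h.length)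
    (Ha : ∀ j, 0 < j → j < h.length → anc pos (par j) → par j ≠ pos → pvGet h (par j) ≤ pvGet h j) :
    (siftup h pos).Perm h ∧
    (∀ j, 0 < j → j < h.length → anc pos (par j) →
        pvGet (siftup h pos) (par j) ≤ pvGet (siftup h pos) j) ∧
    (∀ j, ¬ anc pos j → pvGet (siftup h pos) j = pvGet h j) := by
  have hdef : siftup h pos = siftdownLoop (siftupLoop h pos).1 pos (siftupLoop h pos).2 (pvGet h pos) := rfl
  obtain ⟨P1, P2, P3, P4, P5, P6⟩ :=
    sul_spec (h.length - pos) h pos pos rfl hpos (anc_refl pos)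
      (fun j hj0 hjlen hjanc _ hjp => Ha j hj0 hjlen hjanc hjp)
      (fun _ _ _ _ hlt => absurd hlt (lt_irrefl pos))
  have hslen : (siftupLoop h pos).1.length = h.length := siftupLoop_length h pos
  obtain ⟨Q1, Q2, Q3⟩ :=
    sdl_spec (siftupLoop h pos).2 (siftupLoop h pos).1 pos (pvGet h pos)
      (by omega) P2
      (by
        intro j hj0 hjlen hjanc hj1 hj2
        exact P5 j hj0 (by omega) hjanc hj1 hj2)
      (by
        intro j hj0 hjlen hjpar
        exfalso
        rcases (par_child _ j hj0).mp hjpar with rfl | rfl <;> omega)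
      (by
        intro j hj0 hjlen hjpar _
        exfalso
        rcases (par_child _ j hj0).mp hjpar with rfl | rfl <;> omega)
  rw [hdef]
  refine ⟨?_, ?_, ?_⟩
  · have := Q1.trans (P4 (pvGet h pos))
    rwa [set_pvGet_self h pos hpos] at this
  · intro j hj0 hjlen hjanc
    exact Q2 j hj0 (by omega) hjanc
  · intro j hj
    rw [Q3 j hj, P6 j hj]

-- "the subtree rooted at i satisfies the heap property"
def heapAt (h : List Int) (i : Nat) : Prop :=
  ∀ j, 0 < j → j < h.length → anc i (par j) → pvGet h (par j) ≤ pvGet h j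

theorem heapAt_leaf (h : List Int) (i : Nat) (hi : h.length ≤ 2*i+1) : heapAt h i := by
  intro j hj0 hjlen hjanc
  exfalso
  have h1 := anc_le i (par j) hjanc
  have h2 : par j = (j-1)/2 := rfl
  omega

theorem heapify_step (h : List Int) (i : Nat) (hi : i < h.length)
    (hstep : ∀ j, i+1 ≤ j → heapAt h j) :
    (siftup h i).Perm h ∧ (∀ j, i ≤ j → heapAt (siftup h i) j) := by
  have Ha : ∀ j, 0 < j → j < h.length → anc i (par j) → par j ≠ i → pvGet h (par j) ≤ pvGet h j := by
    intro j hj0 hjlen hjanc hjne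
    rcases anc_split i (par j) hjanc (fun he => hjne he.symm) with hsp | hsp
    · exact hstep (2*i+1) (by omega) j hj0 hjlen hsp
    · exact hstep (2*i+2) (by omega) j hj0 hjlen hsp
  obtain ⟨S1, S2, S3⟩ := siftup_spec h i hi Ha
  have hslen : (siftup h i).length = h.length := S1.length_eq
  refine ⟨S1, ?_⟩
  intro j hij
  rcases eq_or_lt_of_le hij with rfl | hij'
  · intro e he0 helen heanc
    exact S2 e he0 (by omega) heanc
  · by_cases hanc : anc i j
    · intro e he0 helen heanc
      exact S2 e he0 (by omega) (anc_trans i j (par e) hanc heanc)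
    · intro e he0 helen heanc
      rw [hslen] at helen
      have hance : anc j e := anc_step j e (by have := anc_le j (par e) heanc; have := par_lt e he0; omega) heanc
      have hnp : ¬ anc i (par e) := by
        intro hcon
        rcases anc_laminar i j (par e) hcon heanc with hc | hc
        · exact hanc hc
        · have := anc_le j i hc; omega
      have hne : ¬ anc i e := by
        intro hcon
        rcases anc_laminar i j e hcon hance with hc | hc
        · exact hanc hc
        · have := anc_le j i hc; omega
      rw [S3 (par e) hnp, S3 e hne]
      exact hstep j (by omega) e he0 helen heanc

theorem heapify_fold (l : List Int) : ∀ (k : Nat) (h : List Int), 2*k ≤ h.length → h.Perm l →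
    (∀ j, k ≤ j → heapAt h j) →
    ((List.range k).reverse.foldl (fun h i => siftup h i) h).Perm l ∧
    heapAt ((List.range k).reverse.foldl (fun h i => siftup h i) h) 0 := by
  intro k
  induction k with
  | zero =>
    intro h _ hperm hinv
    exact ⟨hperm, hinv 0 (le_refl 0)⟩
  | succ k ihk =>
    intro h hk hperm hinv
    have hkh : k < h.length := by omega
    obtain ⟨T1, T2⟩ := heapify_step h k hkh (fun j hj => hinv j hj)
    have hrw : (List.range (k+1)).reverse = k :: (List.range k).reverse := by
      rw [List.range_succ, List.reverse_append]
      rfl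
    rw [hrw, List.foldl_cons]
    exact ihk (siftup h k) (by rw [T1.length_eq]; omega) (T1.trans hperm) T2

theorem heapify_spec (l : List Int) : (heapify l).Perm l ∧ heapInv (heapify l) := by
  have hdef : heapify l = (List.range (l.length / 2)).reverse.foldl (fun h i => siftup h i) l := rfl
  obtain ⟨H1, H2⟩ := heapify_fold l (l.length / 2) l (by omega) (List.Perm.refl l)
    (fun j hj => heapAt_leaf l j (by omega))
  rw [hdef]
  exact ⟨H1, fun j hj0 hjlen => H2 j hj0 hjlen (anc_zero (par j))⟩

theorem heappush_spec (h : List Int) (x : Int) (hh : heapInv h) :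
    (heappush h x).Perm (x :: h) ∧ heapInv (heappush h x) := by
  have hdef : heappush h x = siftdownLoop (h ++ [x]) 0 h.length x := rfl
  have hlen0 : (h ++ [x]).length = h.length + 1 := by simp
  have hgx : pvGet (h ++ [x]) h.length = x := by
    simp [pvGet, List.getD_eq_getElem?_getD]
  obtain ⟨Q1, Q2, _⟩ :=
    sdl_spec h.length (h ++ [x]) 0 x (by omega) (anc_zero h.length)
      (by
        intro j hj0 hjlen hjanc hjne hjpne
        have hjlt : j < h.length := by omega
        have hplt : par j < h.length := by have := par_lt j hj0; omega
        rw [pvGet_append_lt h [x] j hjlt, pvGet_append_lt h [x] (par j) hplt]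
        exact hh j hj0 hjlt)
      (by
        intro j hj0 hjlen hjpar
        exfalso
        rcases (par_child _ j hj0).mp hjpar with rfl | rfl <;> omega)
      (by
        intro j hj0 hjlen hjpar _
        exfalso
        rcases (par_child _ j hj0).mp hjpar with rfl | rfl <;> omega)
  rw [hdef]
  constructor
  · have h2 : (h ++ [x]).set h.length x = h ++ [x] := by
      have := set_pvGet_self (h ++ [x]) h.length (by omega)
      rwa [hgx] at this
    rw [h2] at Q1
    exact Q1.trans (List.perm_append_singleton x h)
  · intro j hj0 hjlen
    rw [siftdownLoop_length, hlen0] at hjlen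
    exact Q2 j hj0 (by omega) (anc_zero (par j))

theorem pvGet_dropLast (h : List Int) (x : Nat) (hx : x < h.length - 1) :
    pvGet h.dropLast x = pvGet h x := by
  have h1 : x < h.dropLast.length := by simp; omega
  have h2 : x < h.length := by omega
  have h3 : h.dropLast[x] = h[x] := List.getElem_dropLast h1
  rw [pvGet, pvGet, List.getD_eq_getElem?_getD, List.getD_eq_getElem?_getD,
    List.getElem?_eq_getElem h1, List.getElem?_eq_getElem h2]
  simpa using h3

theorem heappop_spec (h : List Int) (hh : heapInv h) (hne : h ≠ []) :
    (heappop h).1 = pvGet h 0 ∧ h.Perm ((heappop h).1 :: (heappop h).2) ∧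
    heapInv (heappop h).2 := by
  have hlen0 : 0 < h.length := List.length_pos_iff.mpr hne
  by_cases hone : h.length = 1
  · obtain ⟨a, rfl⟩ := List.length_eq_one_iff.mp hone
    have hdef : heappop [a] = (a, []) := by simp [heappop, pvGet]
    rw [hdef]
    refine ⟨by simp [pvGet], by simp, ?_⟩
    intro j hj0 hjlen
    simp at hjlen
  · have hlen2 : 2 ≤ h.length := by omega
    have hrestlen : h.dropLast.length = h.length - 1 := by simp
    have hdne : h.dropLast ≠ [] := by
      intro hc
      rw [hc] at hrestlen
      simp at hrestlen
      omega
    have hdef : heappop h =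
        (pvGet h.dropLast 0, siftup (h.dropLast.set 0 (pvGet h (h.length - 1))) 0) := by
      unfold heappop
      rw [if_neg (by simp [List.isEmpty_iff, hdne])]
    have hlen1 : (h.dropLast.set 0 (pvGet h (h.length - 1))).length = h.length - 1 := by simp
    have Ha : ∀ j, 0 < j → j < (h.dropLast.set 0 (pvGet h (h.length - 1))).length →
        anc 0 (par j) → par j ≠ 0 →
        pvGet (h.dropLast.set 0 (pvGet h (h.length - 1))) (par j) ≤
          pvGet (h.dropLast.set 0 (pvGet h (h.length - 1))) j := by
      intro j hj0 hjlen hjanc hjne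
      rw [hlen1] at hjlen
      have hplt : par j < j := par_lt j hj0
      rw [pvGet_set_ne h.dropLast 0 j _ (by omega), pvGet_set_ne h.dropLast 0 (par j) _ (by omega),
        pvGet_dropLast h j (by omega), pvGet_dropLast h (par j) (by omega)]
      exact hh j hj0 (by omega)
    obtain ⟨S1, S2, _⟩ := siftup_spec (h.dropLast.set 0 (pvGet h (h.length - 1))) 0 (by omega) Ha
    have hlast_eq : pvGet h (h.length - 1) = h.getLast hne := by
      rw [List.getLast_eq_getElem]
      simp [pvGet, List.getD_eq_getElem?_getD, List.getElem?_eq_getElem (show h.length-1 < h.length by omega)]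
    have hsplit : h.dropLast ++ [pvGet h (h.length - 1)] = h := by
      rw [hlast_eq]
      exact List.dropLast_concat_getLast hne
    rw [hdef]
    refine ⟨?_, ?_, ?_⟩
    · exact pvGet_dropLast h 0 (by omega)
    · have hc1 : (pvGet h.dropLast 0 :: siftup (h.dropLast.set 0 (pvGet h (h.length - 1))) 0).Perm
          (pvGet h.dropLast 0 :: h.dropLast.set 0 (pvGet h (h.length - 1))) := S1.cons _
      have hc2 := cons_set_perm h.dropLast 0 (pvGet h (h.length - 1)) (by omega)
      have hc3 : (pvGet h (h.length - 1) :: h.dropLast).Perm h := by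
        have := (List.perm_append_singleton (pvGet h (h.length - 1)) h.dropLast).symm
        rwa [hsplit] at this
      exact ((hc1.trans hc2).trans hc3).symm
    · intro j hj0 hjlen
      rw [S1.length_eq, hlen1] at hjlen
      exact S2 j hj0 (by omega) (anc_zero (par j))

theorem rootMin (h : List Int) (hh : heapInv h) (j : Nat) (hj : j < h.length) :
    pvGet h 0 ≤ pvGet h j := by
  induction j using Nat.strong_induction_on with
  | _ j ih =>
    rcases Nat.eq_zero_or_pos j with h0 | h0
    · subst h0; exact le_refl _
    · exact le_trans (ih (par j) (par_lt j h0) (by have := par_lt j h0; omega)) (hh j h0 hj)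

theorem insertSorted_perm (v : Int) (l : List Int) : (insertSorted v l).Perm (v :: l) := by
  induction l with
  | nil => simp [insertSorted]
  | cons x rest ih =>
    simp only [insertSorted]; split
    · exact List.Perm.refl _
    · exact (ih.cons x).trans (List.Perm.swap v x rest)

theorem insertSorted_sorted (v : Int) (l : List Int) (hl : l.Pairwise (· ≤ ·)) :
    (insertSorted v l).Pairwise (· ≤ ·) := by
  induction l with
  | nil => simp [insertSorted]
  | cons x rest ih =>
    rcases List.pairwise_cons.mp hl with ⟨hx, hrest⟩
    rcases lt_or_ge v x with hvx | hvx
    · rw [insertSorted, if_pos hvx]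
      refine List.pairwise_cons.mpr ⟨?_, hl⟩
      intro y hy
      rcases List.mem_cons.mp hy with rfl | hy
      · exact le_of_lt hvx
      · exact le_trans (le_of_lt hvx) (hx y hy)
    · rw [insertSorted, if_neg (not_lt.mpr hvx)]
      refine List.pairwise_cons.mpr ⟨?_, ih hrest⟩
      intro y hy
      rcases List.mem_cons.mp ((insertSorted_perm v rest).mem_iff.mp hy) with rfl | hy
      · exact hvx
      · exact hx y hy

theorem solutionLoop_stop (h : List Int) (K c : Int) (hK : ¬ pvGet h 0 < K) :
    solutionLoop h K c = c := by
  unfold solutionLoop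
  cases hl : h.length with
  | zero => rfl
  | succ m => rw [solGo, if_neg hK]

theorem solutionLoop_neg1 (h : List Int) (K c : Int) (hne : h ≠ []) (hK : pvGet h 0 < K)
    (h2 : h.length < 2) : solutionLoop h K c = -1 := by
  unfold solutionLoop
  obtain ⟨m, hm⟩ : ∃ m, h.length = m + 1 :=
    ⟨h.length - 1, by have := List.length_pos_iff.mpr hne; omega⟩
  rw [hm, solGo, if_pos hK, if_pos (by omega)]

theorem solutionLoop_step (h : List Int) (K c : Int) (hK : pvGet h 0 < K) (h2 : ¬ h.length < 2) :
    solutionLoop h K c =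
      solutionLoop (heappush (heappop (heappop h).2).2 ((heappop h).1 + (heappop (heappop h).2).1 * 2)) K (c + 1) := by
  unfold solutionLoop
  obtain ⟨m, hm⟩ : ∃ m, h.length = m + 1 := ⟨h.length - 1, by omega⟩
  have hnew : (heappush (heappop (heappop h).2).2 ((heappop h).1 + (heappop (heappop h).2).1 * 2)).length = m := by
    rw [heappush_length, heappop_length, heappop_length]
    omega
  rw [hm, solGo, if_pos hK, if_neg (by omega), hnew]

theorem altLoop_stop (s : List Int) (K c : Int) (hK : ¬ s.headD 0 < K) : altLoop s K c = c := by
  unfold altLoop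
  cases hl : s.length with
  | zero => rfl
  | succ m => rw [altGo, if_neg hK]

theorem altLoop_neg1 (s : List Int) (K c : Int) (hne : s ≠ []) (hK : s.headD 0 < K)
    (h2 : s.length < 2) : altLoop s K c = -1 := by
  unfold altLoop
  obtain ⟨m, hm⟩ : ∃ m, s.length = m + 1 :=
    ⟨s.length - 1, by have := List.length_pos_iff.mpr hne; omega⟩
  rw [hm, altGo, if_pos hK, if_pos (by omega)]

theorem altLoop_step (s : List Int) (K c : Int) (hK : s.headD 0 < K) (h2 : ¬ s.length < 2) :
    altLoop s K c = altLoop (insertSorted (s.headD 0 + (s.drop 1).headD 0 * 2) (s.drop 2)) K (c + 1) := by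
  unfold altLoop
  obtain ⟨m, hm⟩ : ∃ m, s.length = m + 1 := ⟨s.length - 1, by omega⟩
  have hnew : (insertSorted (s.headD 0 + (s.drop 1).headD 0 * 2) (s.drop 2)).length = m := by
    rw [insertSorted_length]
    simp
    omega
  rw [hm, altGo, if_pos hK, if_neg (by omega), hnew]

-- the root of the heap is the head of any sorted rearrangement
theorem head_min (h s' : List Int) (a : Int) (hh : heapInv h) (hperm : h.Perm (a :: s'))
    (hsort : (a :: s').Pairwise (· ≤ ·)) : pvGet h 0 = a := by
  have hlen : h.length = s'.length + 1 := by simpa using hperm.length_eq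
  have hmem : pvGet h 0 ∈ h := pvGet_mem h 0 (by omega)
  have h1 : a ≤ pvGet h 0 := by
    rcases List.mem_cons.mp (hperm.mem_iff.mp hmem) with he | hm
    · omega
    · exact (List.pairwise_cons.mp hsort).1 _ hm
  have h2 : pvGet h 0 ≤ a := by
    have ha : a ∈ h := hperm.mem_iff.mpr (List.mem_cons_self)
    obtain ⟨i, hi, hia⟩ := List.mem_iff_getElem.mp ha
    have : pvGet h i = h[i] := by
      simp [pvGet, List.getD_eq_getElem?_getD, List.getElem?_eq_getElem hi]
    have := rootMin h hh i hi
    omega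
  omega

theorem loop_eq (n : Nat) : ∀ (h s : List Int) (K c : Int), h.length ≤ n → heapInv h →
    h.Perm s → s.Pairwise (· ≤ ·) → h ≠ [] → solutionLoop h K c = altLoop s K c := by
  induction n with
  | zero =>
    intro h s K c hlen _ _ _ hne
    exact absurd (List.length_eq_zero_iff.mp (by omega)) hne
  | succ n ihn =>
    intro h s K c hlen hh hperm hsort hne
    obtain ⟨a, s', rfl⟩ : ∃ a s', s = a :: s' := by
      cases s with
      | nil => exact absurd (hperm.eq_nil) hne
      | cons a s' => exact ⟨a, s', rfl⟩
    have hlens : h.length = s'.length + 1 := by simpa using hperm.length_eq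
    have hhead : pvGet h 0 = a := head_min h s' a hh hperm hsort
    by_cases hK : a < K
    · by_cases h2 : h.length < 2
      · rw [solutionLoop_neg1 h K c hne (by rw [hhead]; exact hK) h2,
          altLoop_neg1 _ K c (by simp) (by simpa using hK) (by simp only [List.length_cons]; omega)]
      · obtain ⟨b, s'', rfl⟩ : ∃ b s'', s' = b :: s'' := by
          cases s' with
          | nil => simp at hlens; omega
          | cons b s'' => exact ⟨b, s'', rfl⟩
        obtain ⟨P1a, P1b, P1c⟩ := heappop_spec h hh hne
        have hperm1 : (heappop h).2.Perm (b :: s'') := by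
          have := (P1b.symm.trans hperm)
          rw [P1a, hhead] at this
          exact this.cons_inv
        have hlen1 : (heappop h).2.length = s''.length + 1 := by simpa using hperm1.length_eq
        have hne1 : (heappop h).2 ≠ [] := List.length_pos_iff.mp (by omega)
        have hsort' : (b :: s'').Pairwise (· ≤ ·) := (List.pairwise_cons.mp hsort).2
        obtain ⟨P2a, P2b, P2c⟩ := heappop_spec (heappop h).2 P1c hne1
        have hhead1 : pvGet (heappop h).2 0 = b := head_min _ s'' b P1c hperm1 hsort'
        have hperm2 : (heappop (heappop h).2).2.Perm s'' := by
          have := (P2b.symm.trans hperm1)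
          rw [P2a, hhead1] at this
          exact this.cons_inv
        obtain ⟨P3a, P3b⟩ := heappush_spec (heappop (heappop h).2).2 (a + b * 2) P2c
        have hpushlen : (heappush (heappop (heappop h).2).2 (a + b * 2)).length =
            (heappop (heappop h).2).2.length + 1 := heappush_length _ _
        have hlen2 : (heappop (heappop h).2).2.length = s''.length := by
          simpa using hperm2.length_eq
        rw [solutionLoop_step h K c (by rw [hhead]; exact hK) h2,
          altLoop_step _ K c (by simpa using hK) (by simp only [List.length_cons]; omega)]
        rw [P1a, P2a, hhead, hhead1]
        have hdrop2 : (a :: b :: s'').drop 2 = s'' := rfl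
        have hd1 : ((a :: b :: s'').drop 1).headD 0 = b := rfl
        have hd0 : (a :: b :: s'').headD 0 = a := rfl
        rw [hdrop2, hd1, hd0]
        have hbs : (b :: s'').length = s''.length + 1 := by simp
        apply ihn
        · omega
        · exact P3b
        · exact P3a.trans ((hperm2.cons (a + b * 2)).trans (insertSorted_perm (a + b * 2) s'').symm)
        · exact insertSorted_sorted (a + b * 2) s'' (List.pairwise_cons.mp hsort').2
        · exact List.length_pos_iff.mp (by omega)
    · rw [solutionLoop_stop h K c (by rw [hhead]; exact hK), altLoop_stop _ K c (by simpa using hK)]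

-- ===== VERDICT (by name: the statement is the Claim_ definition above) =====
theorem solution_spec : Claim_equal_solution := by
  intro scoville K _ hpre
  unfold Spec_solution solution solution_alt
  obtain ⟨hperm, hinv⟩ := heapify_spec scoville
  have hsp : (PySem.List.sorted scoville (fun x => x) false).Perm scoville := PySem.List.sorted_perm _ _ _
  have hpw : (PySem.List.sorted scoville (fun x => x) false).Pairwise (· ≤ ·) := PySem.List.sorted_pairwise _ _
  exact loop_eq (heapify scoville).length (heapify scoville) _ K 0 (le_refl _) hinv
    (hperm.trans hsp.symm) hpw
    (by
      intro hc
      apply hpre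
      have h0 : ([] : List Int).Perm scoville := hc ▸ hperm
      exact h0.symm.eq_nil)
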